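-- pv_equiv track=rewrite | github.com/sanjabh11/LLM_from_scratch | skills/kimi2-defense-presentation-architect/scripts/build_deck_scaffold.py | cycle_topics
-- ===== SOURCE A (Python) =====
-- def cycle_topics(topics: list[str], count: int, fallback_prefix: str) -> list[str]:
--     if not topics:
--         return [f"{fallback_prefix} {i + 1}" for i in range(count)]
--     out: list[str] = []
--     index = 0
--     for _ in range(count):
--         out.append(topics[index])
--         index = (index + 1) % len(topics)
--     return out
-- ===== SOURCE B (Python) =====
-- def cycle_topics(topics: list[str], count: int, fallback_prefix: str) -> list[str]:
--     if not topics: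
--         return [f"{fallback_prefix} {i + 1}" for i in range(count)]
--     reps = count // len(topics) + 1
--     return (topics * reps)[:count]
-- ===== Notes on version B (the rewrite author's own statement) =====
-- stated objective: idiomatic
-- what changed: Replaces the element-by-element modulo-index append loop with one replicate-and-slice: build count//len(topics)+1 full copies of the list and truncate to count.
import Mathlib
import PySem

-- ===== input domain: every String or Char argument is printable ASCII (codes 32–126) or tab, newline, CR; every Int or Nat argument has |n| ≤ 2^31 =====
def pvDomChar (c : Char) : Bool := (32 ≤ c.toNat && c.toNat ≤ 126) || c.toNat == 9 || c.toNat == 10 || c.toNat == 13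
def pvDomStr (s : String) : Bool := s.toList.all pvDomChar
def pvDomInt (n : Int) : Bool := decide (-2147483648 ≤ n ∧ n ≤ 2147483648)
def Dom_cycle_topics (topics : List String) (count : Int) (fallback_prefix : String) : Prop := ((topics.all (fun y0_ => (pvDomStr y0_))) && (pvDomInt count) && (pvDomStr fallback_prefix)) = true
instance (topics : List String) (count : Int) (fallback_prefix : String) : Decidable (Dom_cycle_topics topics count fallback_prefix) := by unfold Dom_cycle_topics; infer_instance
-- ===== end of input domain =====

-- B replaces A's modulo-index append loop by replicate-and-slice (idiomatic; same cost).

-- ===== PORT A =====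
-- topics[index] is always in range (0 ≤ index < len topics in the loop), so pyGetD is exact here.
def cycle_topics (topics : List String) (count : Int) (fallback_prefix : String) : List String :=
  if topics.isEmpty then
    (PySem.List.pyRange 0 count 1).map (fun i => fallback_prefix ++ " " ++ PySem.Int.toStr (i + 1))
  else
    ((PySem.List.pyRange 0 count 1).foldl
      (fun (st : List String × Int) _ =>
        (st.1 ++ [PySem.List.pyGetD topics st.2 ""], PySem.Int.mod (st.2 + 1) (topics.length : Int)))
      ([], 0)).1

-- ===== PORT B =====
def cycle_topics_alt (topics : List String) (count : Int) (fallback_prefix : String) : List String :=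
  if topics.isEmpty then
    (PySem.List.pyRange 0 count 1).map (fun i => fallback_prefix ++ " " ++ PySem.Int.toStr (i + 1))
  else
    PySem.List.slice
      (List.replicate (PySem.Int.floordiv count (topics.length : Int) + 1).toNat topics).flatten
      none (some count)

-- ===== PRECONDITION & SPEC =====
def Spec_cycle_topics (topics : List String) (count : Int) (fallback_prefix : String) (out : List String) : Prop := out = cycle_topics_alt topics count fallback_prefix
instance (topics : List String) (count : Int) (fallback_prefix : String) (out : List String) : Decidable (Spec_cycle_topics topics count fallback_prefix out) := by unfold Spec_cycle_topics; infer_instance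

-- ===== CLAIM (what is proved, stated in full; the proofs are below) =====
def Claim_equal_cycle_topics : Prop := ∀ (topics : List String) (count : Int) (fallback_prefix : String), Dom_cycle_topics topics count fallback_prefix → Spec_cycle_topics topics count fallback_prefix (cycle_topics topics count fallback_prefix)

-- ===== LEMMAS AND PROOFS =====

-- A's loop invariant: starting from (out, idx) with idx < n, k iterations append the
-- cyclic elements topics[(idx+j) % n] for j < k and leave index (idx+k) % n.
theorem cycle_loop_inv (topics : List String) (h : topics ≠ []) :
    ∀ (k : Nat) (out : List String) (idx : Nat), idx < topics.length →
    (List.range k).foldl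
      (fun (st : List String × Int) _ =>
        (st.1 ++ [PySem.List.pyGetD topics st.2 ""], PySem.Int.mod (st.2 + 1) (topics.length : Int)))
      (out, (idx : Int))
    = (out ++ (List.range k).map (fun j => topics.getD ((idx + j) % topics.length) ""),
       (((idx + k) % topics.length : Nat) : Int)) := by
  intro k
  induction k with
  | zero => intro out idx hidx; simp [Nat.mod_eq_of_lt hidx]
  | succ k ih =>
    intro out idx hidx
    have hn : 0 < topics.length := List.length_pos_iff.mpr h
    rw [List.range_succ, List.foldl_append, ih out idx hidx]
    simp only [List.foldl_cons, List.foldl_nil, List.map_append, List.map_cons,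
      List.map_nil, List.append_assoc, Prod.mk.injEq]
    refine ⟨?_, ?_⟩
    · rw [PySem.List.pyGetD_natCast]
    · rw [PySem.Int.mod_eq_emod_of_pos (by exact_mod_cast hn : (0:Int) < (topics.length : Int))]
      have h1 : ((((idx + k) % topics.length : Nat) : Int) + 1)
          = (((idx + k) % topics.length + 1 : Nat) : Int) := by push_cast; ring
      rw [h1, ← Int.natCast_mod]
      congr 1
      conv_rhs => rw [show idx + (k + 1) = (idx + k) + 1 from by ring]
      simp [Nat.add_mod]

-- flatten of r copies of topics is the first r*n cyclic elements
theorem flatten_replicate_cycle (topics : List String) (_h : topics ≠ []) :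
    ∀ (r : Nat), (List.replicate r topics).flatten
      = (List.range (r * topics.length)).map (fun j => topics.getD (j % topics.length) "") := by
  intro r
  induction r with
  | zero => simp
  | succ r ih =>
    rw [List.replicate_succ, List.flatten_cons, ih]
    have hsplit : (r + 1) * topics.length = topics.length + r * topics.length := by ring
    rw [hsplit, List.range_add, List.map_append]
    congr 1
    · apply List.ext_getElem
      · simp
      · intro i h1 h2
        simp only [List.getElem_map, List.getElem_range]
        rw [Nat.mod_eq_of_lt h1, List.getD_eq_getElem _ _ h1]
    · rw [List.map_map]
      congr 1
      funext j
      simp [Nat.add_mod_left]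

theorem cycle_topics_spec : Claim_equal_cycle_topics := by
  intro topics count fallback_prefix _
  unfold Spec_cycle_topics cycle_topics cycle_topics_alt
  by_cases he : topics.isEmpty
  · simp [he]
  · rw [if_neg he, if_neg he]
    have h : topics ≠ [] := by simpa [List.isEmpty_iff] using he
    have hn : 0 < topics.length := List.length_pos_iff.mpr h
    have hnI : (0:Int) < (topics.length : Int) := by exact_mod_cast hn
    by_cases hc : count ≤ 0
    · rw [PySem.List.pyRange_one_eq_nil hc]
      rcases lt_or_eq_of_le hc with hlt | heq
      · -- count < 0: the multiplier is ≤ 0, so the replicated list is empty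
        have hfd : PySem.Int.floordiv count (topics.length : Int) < 0 := by
          have heq2 := PySem.Int.floordiv_mul_add_mod count (topics.length : Int)
          have hmod := PySem.Int.mod_nonneg count hnI
          nlinarith
        have hreps : (PySem.Int.floordiv count (topics.length : Int) + 1).toNat = 0 := by omega
        rw [hreps]
        simp [PySem.List.slice]
      · subst heq
        rw [PySem.List.slice_to _ le_rfl]
        simp
    · -- count > 0
      rw [not_le] at hc
      rw [PySem.List.pyRange_one, List.foldl_map]
      simp only [sub_zero]
      have hA := cycle_loop_inv topics h count.toNat [] 0 hn
      simp only [Nat.cast_zero, List.nil_append, zero_add] at hA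
      rw [hA]
      have hcr : count.toNat ≤ (PySem.Int.floordiv count (topics.length : Int) + 1).toNat * topics.length := by
        have heq2 := PySem.Int.floordiv_mul_add_mod count (topics.length : Int)
        have hmlt := PySem.Int.mod_lt count hnI
        have hmod := PySem.Int.mod_nonneg count hnI
        have hfd : 0 ≤ PySem.Int.floordiv count (topics.length : Int) := by nlinarith
        have hlt : count < (PySem.Int.floordiv count (topics.length : Int) + 1) * (topics.length : Int) := by
          nlinarith
        have hrc : ((PySem.Int.floordiv count (topics.length : Int) + 1).toNat : Int)
            = PySem.Int.floordiv count (topics.length : Int) + 1 := by omega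
        have : count < ((PySem.Int.floordiv count (topics.length : Int) + 1).toNat : Int) * (topics.length : Int) := by
          rw [hrc]; exact hlt
        have := this
        push_cast at this
        omega
      rw [flatten_replicate_cycle topics h, PySem.List.slice_to _ hc.le,
        ← List.map_take, List.take_range, Nat.min_eq_left hcr]

-- ===== VERDICT (by name: the statement is the Claim_ definition above) =====
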